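-- pv_equiv track=rewrite | github.com/hyeong8465/coding_test | Python/백준/Gold/17144. 미세먼지 안녕！/미세먼지 안녕！.py | wind
-- ===== SOURCE A (Python) =====
-- def wind(room, cond1, cond2, R, C):
--     # 1. 윗 부분 공기청정기 (반시계 방향)
--     # (cond1[0], cond1[1]) 에서 시작
--
--     # 공기청정기 바로 옆 칸의 먼지 (나중에 공기청정기로 들어갈 먼지)를 0으로 만듦
--     # 실제로는 공기청정기에서 바람이 나와 그 다음칸을 비우는 것이므로,
--     # 공기청정기 바로 다음칸부터 시작하여 한 칸씩 당겨오는 방식으로 구현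
--
--     # 1-1. 오른쪽으로 이동 (공기청정기 오른쪽 칸부터 시작)
--     r_top, c_top = cond1[0], cond1[1]
--     prev_dust = 0 # 공기청정기에서 나오는 바람은 0
--
--     # 첫 줄 오른쪽으로 이동: (r_top, c_top+1) -> (r_top, c_top)
--     #                      (r_top, c_top+2) -> (r_top, c_top+1) ...
--     for j in range(c_top + 1, C):
--         curr_dust = room[r_top][j]
--         room[r_top][j] = prev_dust
--         prev_dust = curr_dust
--
--     # 1-2. 위쪽으로 이동 (맨 오른쪽 위 칸까지)
--     # (r_top-1, C-1) -> (r_top, C-1) ... (0, C-1) -> (1, C-1)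
--     for i in range(r_top - 1, -1, -1):
--         curr_dust = room[i][C - 1]
--         room[i][C - 1] = prev_dust
--         prev_dust = curr_dust
--
--     # 1-3. 왼쪽으로 이동 (맨 위쪽 왼쪽 칸까지)
--     # (0, C-2) -> (0, C-1) ... (0, 0) -> (0, 1)
--     for j in range(C - 2, -1, -1):
--         curr_dust = room[0][j]
--         room[0][j] = prev_dust
--         prev_dust = curr_dust
--
--     # 1-4. 아래쪽으로 이동 (공기청정기 바로 윗 칸까지)
--     # (1, 0) -> (0, 0) ... (r_top-1, 0) -> (r_top-2, 0)
--     for i in range(1, r_top):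
--         curr_dust = room[i][0]
--         room[i][0] = prev_dust
--         prev_dust = curr_dust
--
--     # 2. 아랫 부분 공기청정기 (시계 방향)
--     # (cond2[0], cond2[1]) 에서 시작
--     r_bottom, c_bottom = cond2[0], cond2[1]
--     prev_dust = 0 # 공기청정기에서 나오는 바람은 0
--
--     # 2-1. 오른쪽으로 이동
--     for j in range(c_bottom + 1, C):
--         curr_dust = room[r_bottom][j]
--         room[r_bottom][j] = prev_dust
--         prev_dust = curr_dust
--
--     # 2-2. 아래쪽으로 이동
--     for i in range(r_bottom + 1, R):
--         curr_dust = room[i][C - 1]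
--         room[i][C - 1] = prev_dust
--         prev_dust = curr_dust
--
--     # 2-3. 왼쪽으로 이동
--     for j in range(C - 2, -1, -1):
--         curr_dust = room[R - 1][j]
--         room[R - 1][j] = prev_dust
--         prev_dust = curr_dust
--
--     # 2-4. 위쪽으로 이동
--     for i in range(R - 2, r_bottom, -1):
--         curr_dust = room[i][0]
--         room[i][0] = prev_dust
--         prev_dust = curr_dust
--
--     # 공기청정기 위치는 -1로 유지
--     room[cond1[0]][cond1[1]] = -1
--     room[cond2[0]][cond2[1]] = -1
--
--     return room
-- ===== SOURCE B (Python) =====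
-- def wind(room, cond1, cond2, R, C):
--     # Build each purifier's full pull path once, then rotate it in place by walking
--     # the path BACKWARD, copying each cell directly from its predecessor (no carry
--     # accumulator); the path head becomes 0.  Mutates room in place like A.
--     r1, c1 = cond1[0], cond1[1]
--     top = ([(r1, j) for j in range(c1 + 1, C)]
--            + [(i, C - 1) for i in range(r1 - 1, -1, -1)]
--            + [(0, j) for j in range(C - 2, -1, -1)]
--            + [(i, 0) for i in range(1, r1)])
--     r2, c2 = cond2[0], cond2[1]
--     bottom = ([(r2, j) for j in range(c2 + 1, C)]
--               + [(i, C - 1) for i in range(r2 + 1, R)]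
--               + [(R - 1, j) for j in range(C - 2, -1, -1)]
--               + [(i, 0) for i in range(R - 2, r2, -1)])
--     for path in (top, bottom):
--         for (di, dj), (si, sj) in reversed(list(zip(path[1:], path))):
--             room[di][dj] = room[si][sj]
--         if path:
--             hi, hj = path[0]
--             room[hi][hj] = 0
--     room[r1][c1] = -1
--     room[r2][c2] = -1
--     return room
-- ===== Notes on version B (the rewrite author's own statement) =====
-- stated objective: alternative
-- what changed: A threads a prev-dust carry accumulator through eight interleaved read-modify-write loops; B builds each purifier's full pull path as one coordinate list and rotates it in place by walking the path backward, copying every cell directly from its predecessor and zeroing the path head (no carry, reverse traversal order). …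
-- outside the precondition, e.g. on wind([[0, 1, 0]], [0, 0], [0, 0], 1, 3): A returns [[-1, 1, 0]], B returns [[-1, 0, 0]]; on wind([[0], [0], [1]], [0, 0], [0, 0], 3, 1): A returns [[-1], [1], [0]], B returns [[-1], [0], [1]]
import Mathlib
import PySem

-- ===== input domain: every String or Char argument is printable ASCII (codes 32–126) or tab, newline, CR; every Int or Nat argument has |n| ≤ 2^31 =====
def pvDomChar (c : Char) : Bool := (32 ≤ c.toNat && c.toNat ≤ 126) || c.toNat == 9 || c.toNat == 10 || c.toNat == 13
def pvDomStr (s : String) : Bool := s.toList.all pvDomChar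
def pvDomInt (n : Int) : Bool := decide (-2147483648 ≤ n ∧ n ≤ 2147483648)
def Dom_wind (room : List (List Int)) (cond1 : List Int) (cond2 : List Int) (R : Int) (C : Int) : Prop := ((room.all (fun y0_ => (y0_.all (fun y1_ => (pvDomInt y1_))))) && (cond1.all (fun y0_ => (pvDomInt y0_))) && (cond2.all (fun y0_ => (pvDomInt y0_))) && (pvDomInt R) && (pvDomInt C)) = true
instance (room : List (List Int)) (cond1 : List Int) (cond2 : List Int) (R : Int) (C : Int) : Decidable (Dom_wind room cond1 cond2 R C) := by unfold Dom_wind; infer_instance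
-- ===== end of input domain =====

-- B builds each purifier's full pull path once and rotates it by walking the path backward,
-- copying each cell directly from its predecessor (no carry accumulator); Python A and B both
-- mutate `room` in place, and the equivalence proved is about the return value.

-- ===== PORT A =====
-- room[i][j] (read): exact where Python returns a value; Python's IndexError inputs are excluded by Pre_
def getCell (g : List (List Int)) (i j : Int) : Int :=
  PySem.List.pyGetD (PySem.List.pyGetD g i []) j 0

-- room[i][j] = v: exact where Python assigns; Python's IndexError inputs are excluded by Pre_
def setCell (g : List (List Int)) (i j : Int) (v : Int) : List (List Int) :=
  PySem.List.pySetD g i (PySem.List.pySetD (PySem.List.pyGetD g i []) j v)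

-- the loop body shared by A's eight loops: curr = room[i][j]; room[i][j] = prev; prev = curr
def windStep (st : List (List Int) × Int) (i j : Int) : List (List Int) × Int :=
  (setCell st.1 i j st.2, getCell st.1 i j)

def wind (room : List (List Int)) (cond1 : List Int) (cond2 : List Int) (R : Int) (C : Int) : List (List Int) :=
  let r1 := PySem.List.pyGetD cond1 0 0
  let c1 := PySem.List.pyGetD cond1 1 0
  let s1 := (PySem.List.pyRange (c1 + 1) C 1).foldl (fun st j => windStep st r1 j) (room, 0)
  let s2 := (PySem.List.pyRange (r1 - 1) (-1) (-1)).foldl (fun st i => windStep st i (C - 1)) s1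
  let s3 := (PySem.List.pyRange (C - 2) (-1) (-1)).foldl (fun st j => windStep st 0 j) s2
  let s4 := (PySem.List.pyRange 1 r1 1).foldl (fun st i => windStep st i 0) s3
  let r2 := PySem.List.pyGetD cond2 0 0
  let c2 := PySem.List.pyGetD cond2 1 0
  let t1 := (PySem.List.pyRange (c2 + 1) C 1).foldl (fun st j => windStep st r2 j) (s4.1, 0)
  let t2 := (PySem.List.pyRange (r2 + 1) R 1).foldl (fun st i => windStep st i (C - 1)) t1
  let t3 := (PySem.List.pyRange (C - 2) (-1) (-1)).foldl (fun st j => windStep st (R - 1) j) t2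
  let t4 := (PySem.List.pyRange (R - 2) r2 (-1)).foldl (fun st i => windStep st i 0) t3
  setCell (setCell t4.1 r1 c1 (-1)) r2 c2 (-1)

-- ===== PORT B =====
-- the top purifier's pull path (counterclockwise), Source B's `top` list (Python + is left-associated)
def pathTop (cond1 : List Int) (C : Int) : List (Int × Int) :=
  let r1 := PySem.List.pyGetD cond1 0 0
  let c1 := PySem.List.pyGetD cond1 1 0
  ((((PySem.List.pyRange (c1 + 1) C 1).map (fun j => (r1, j)))
    ++ ((PySem.List.pyRange (r1 - 1) (-1) (-1)).map (fun i => (i, C - 1))))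
    ++ ((PySem.List.pyRange (C - 2) (-1) (-1)).map (fun j => ((0 : Int), j))))
    ++ ((PySem.List.pyRange 1 r1 1).map (fun i => (i, (0 : Int))))

-- the bottom purifier's pull path (clockwise), Source B's `bottom` list
def pathBottom (cond2 : List Int) (R : Int) (C : Int) : List (Int × Int) :=
  let r2 := PySem.List.pyGetD cond2 0 0
  let c2 := PySem.List.pyGetD cond2 1 0
  ((((PySem.List.pyRange (c2 + 1) C 1).map (fun j => (r2, j)))
    ++ ((PySem.List.pyRange (r2 + 1) R 1).map (fun i => (i, C - 1))))
    ++ ((PySem.List.pyRange (C - 2) (-1) (-1)).map (fun j => (R - 1, j))))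
    ++ ((PySem.List.pyRange (R - 2) r2 (-1)).map (fun i => (i, (0 : Int))))

-- Source B's inner loop: for (d, s) in reversed(list(zip(path[1:], path))): room[d] = room[s];
-- then the path head becomes 0
def backShift (g : List (List Int)) (p : List (Int × Int)) : List (List Int) :=
  let g1 := ((p.tail.zip p).reverse).foldl
    (fun h dq => setCell h dq.1.1 dq.1.2 (getCell h dq.2.1 dq.2.2)) g
  match p with
  | [] => g1
  | c :: _ => setCell g1 c.1 c.2 0

def wind_alt (room : List (List Int)) (cond1 : List Int) (cond2 : List Int) (R : Int) (C : Int) : List (List Int) :=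
  let g1 := backShift room (pathTop cond1 C)
  let g2 := backShift g1 (pathBottom cond2 R C)
  setCell (setCell g2 (PySem.List.pyGetD cond1 0 0) (PySem.List.pyGetD cond1 1 0) (-1))
    (PySem.List.pyGetD cond2 0 0) (PySem.List.pyGetD cond2 1 0) (-1)

-- ===== PRECONDITION & SPEC =====
-- the row of `room` Python's room[i] denotes ([] when i is out of range)
def rowAt (room : List (List Int)) (i : Int) : List Int := PySem.List.pyGetD room i []

-- the (row, column) position of the grid cell Python's room[i][j] denotes; none when it raises
def resolveCell (g : List (List Int)) (c : Int × Int) : Option (Nat × Nat) :=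
  match PySem.List.pyIdx? g.length c.1, PySem.List.pyIdx? (rowAt g c.1).length c.2 with
  | some a, some b => some (a, b)
  | _, _ => none

-- Pre_ = A's exact no-IndexError condition (cond lists long enough, every cell the loops and the
-- final purifier writes touch is in Python range) plus the requirement that each purifier's pull
-- path visits pairwise DISTINCT grid cells.  The excluded returning inputs are those where a pull
-- path crosses itself (purifier on a border row, C = 1, or negative-index wraparound aliasing):
-- there A's interleaved pass re-reads its own earlier writes, so both programs' values are
-- accidental and differ (see the cites in the claim).
def Pre_wind (room : List (List Int)) (cond1 : List Int) (cond2 : List Int) (R : Int) (C : Int) : Prop :=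
  2 ≤ cond1.length ∧ 2 ≤ cond2.length ∧
  (resolveCell room (PySem.List.pyGetD cond1 0 0, PySem.List.pyGetD cond1 1 0)).isSome = true ∧
  (resolveCell room (PySem.List.pyGetD cond2 0 0, PySem.List.pyGetD cond2 1 0)).isSome = true ∧
  (∀ c ∈ pathTop cond1 C, (resolveCell room c).isSome = true) ∧
  ((pathTop cond1 C).map (resolveCell room)).Nodup ∧
  (∀ c ∈ pathBottom cond2 R C, (resolveCell room c).isSome = true) ∧
  ((pathBottom cond2 R C).map (resolveCell room)).Nodup
instance (room : List (List Int)) (cond1 : List Int) (cond2 : List Int) (R : Int) (C : Int) : Decidable (Pre_wind room cond1 cond2 R C) := by unfold Pre_wind; infer_instance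

def pvWitness_wind : List (List Int) × List Int × List Int × Int × Int :=
  ([[1, 2, 3], [4, 5, 6], [7, 8, 9], [10, 11, 12]], [1, 0], [2, 0], 4, 3)

def Spec_wind (room : List (List Int)) (cond1 : List Int) (cond2 : List Int) (R : Int) (C : Int) (out : List (List Int)) : Prop := out = wind_alt room cond1 cond2 R C
instance (room : List (List Int)) (cond1 : List Int) (cond2 : List Int) (R : Int) (C : Int) (out : List (List Int)) : Decidable (Spec_wind room cond1 cond2 R C out) := by unfold Spec_wind; infer_instance

-- ===== CLAIM (what is proved, stated in full; the proofs are below) =====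
def Claim_equal_wind : Prop := ∀ (room : List (List Int)) (cond1 : List Int) (cond2 : List Int) (R : Int) (C : Int), Dom_wind room cond1 cond2 R C → Pre_wind room cond1 cond2 R C → Spec_wind room cond1 cond2 R C (wind room cond1 cond2 R C)

-- ===== LEMMAS AND PROOFS =====

-- write a list of (cell, value) pairs into the grid, left to right
def wl (g : List (List Int)) (l : List ((Int × Int) × Int)) : List (List Int) :=
  l.foldl (fun h q => setCell h q.1.1 q.1.2 q.2) g

lemma pyIdx?_some_lt {n : Nat} {i : Int} {a : Nat} (h : PySem.List.pyIdx? n i = some a) : a < n := by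
  unfold PySem.List.pyIdx? at h
  split_ifs at h <;> simp_all <;> omega

lemma pyGetD_of_pyIdx {α : Type} (xs : List α) (i : Int) (d : α) (a : Nat)
    (h : PySem.List.pyIdx? xs.length i = some a) : PySem.List.pyGetD xs i d = xs.getD a d := by
  unfold PySem.List.pyGetD PySem.List.pyGet?
  rw [h]
  simp [List.getD_eq_getElem?_getD]

lemma pySetD_of_pyIdx {α : Type} (xs : List α) (i : Int) (v : α) (a : Nat)
    (h : PySem.List.pyIdx? xs.length i = some a) : PySem.List.pySetD xs i v = xs.set a v := by
  unfold PySem.List.pySetD PySem.List.pySet?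
  rw [h]
  simp

lemma resolveCell_eq_some {g : List (List Int)} {c : Int × Int} {ab : Nat × Nat}
    (h : resolveCell g c = some ab) :
    PySem.List.pyIdx? g.length c.1 = some ab.1 ∧
    PySem.List.pyIdx? (rowAt g c.1).length c.2 = some ab.2 := by
  unfold resolveCell at h
  cases h1 : PySem.List.pyIdx? g.length c.1 <;>
    cases h2 : PySem.List.pyIdx? (rowAt g c.1).length c.2 <;>
    rw [h1, h2] at h <;> simp_all
  exact ⟨congrArg Prod.fst h, congrArg Prod.snd h⟩

lemma getCell_of_resolve {g : List (List Int)} {c : Int × Int} {ab : Nat × Nat}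
    (h : resolveCell g c = some ab) : getCell g c.1 c.2 = (g.getD ab.1 []).getD ab.2 0 := by
  obtain ⟨h1, h2⟩ := resolveCell_eq_some h
  have hrow : rowAt g c.1 = g.getD ab.1 [] := pyGetD_of_pyIdx g c.1 [] ab.1 h1
  unfold getCell
  rw [show PySem.List.pyGetD g c.1 [] = g.getD ab.1 [] from hrow]
  rw [hrow] at h2
  exact pyGetD_of_pyIdx _ _ _ _ h2

lemma setCell_of_resolve {g : List (List Int)} {c : Int × Int} {ab : Nat × Nat} {v : Int}
    (h : resolveCell g c = some ab) :
    setCell g c.1 c.2 v = g.set ab.1 ((g.getD ab.1 []).set ab.2 v) := by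
  obtain ⟨h1, h2⟩ := resolveCell_eq_some h
  have hrow : rowAt g c.1 = g.getD ab.1 [] := pyGetD_of_pyIdx g c.1 [] ab.1 h1
  unfold setCell
  rw [show PySem.List.pyGetD g c.1 [] = g.getD ab.1 [] from hrow]
  rw [hrow] at h2
  rw [pySetD_of_pyIdx _ _ _ _ h2]
  exact pySetD_of_pyIdx _ _ _ _ h1

-- shape (length and every row length) is invariant under setCell
def shapeEq (g h : List (List Int)) : Prop :=
  g.length = h.length ∧ ∀ i : Int, (rowAt g i).length = (rowAt h i).length

lemma shapeEq_refl (g : List (List Int)) : shapeEq g g := ⟨rfl, fun _ => rfl⟩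

lemma shapeEq_trans {g h k : List (List Int)} (h1 : shapeEq g h) (h2 : shapeEq h k) : shapeEq g k :=
  ⟨h1.1.trans h2.1, fun i => (h1.2 i).trans (h2.2 i)⟩

lemma setCell_shapeEq (g : List (List Int)) (i j v : Int) : shapeEq (setCell g i j v) g := by
  unfold setCell
  generalize hX : PySem.List.pySetD (PySem.List.pyGetD g i []) j v = X
  have hXlen : X.length = (PySem.List.pyGetD g i []).length := by
    rw [← hX, PySem.List.length_pySetD]
  unfold PySem.List.pySetD PySem.List.pySet?
  cases h : PySem.List.pyIdx? g.length i with
  | none => simp [shapeEq_refl]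
  | some a =>
    have ha : a < g.length := pyIdx?_some_lt h
    have hrow : PySem.List.pyGetD g i [] = g[a] := by
      unfold PySem.List.pyGetD PySem.List.pyGet?
      rw [h]
      simp [List.getElem?_eq_getElem ha]
    simp only [Option.map_some, Option.getD_some]
    refine ⟨List.length_set .., ?_⟩
    intro i'
    unfold rowAt PySem.List.pyGetD PySem.List.pyGet?
    rw [List.length_set]
    cases h' : PySem.List.pyIdx? g.length i' with
    | none => rfl
    | some b =>
      have hb : b < g.length := pyIdx?_some_lt h'
      simp only [Option.bind_some]
      by_cases hba : b = a
      · subst hba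
        simp only [List.getElem?_set, if_pos hb, List.getElem?_eq_getElem hb, if_true,
          Option.getD_some]
        rw [hXlen, hrow]
      · rw [List.getElem?_set_ne (by omega)]

lemma wl_shapeEq (l : List ((Int × Int) × Int)) : ∀ g : List (List Int), shapeEq (wl g l) g := by
  induction l with
  | nil => intro g; exact shapeEq_refl g
  | cons q rest ih =>
    intro g
    exact shapeEq_trans (ih (setCell g q.1.1 q.1.2 q.2)) (setCell_shapeEq ..)

lemma resolveCell_congr {g h : List (List Int)} (hs : shapeEq g h) (c : Int × Int) :
    resolveCell g c = resolveCell h c := by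
  unfold resolveCell
  rw [hs.1, show (rowAt g c.1).length = (rowAt h c.1).length from hs.2 c.1]

-- reading a cell is unaffected by writing a DIFFERENT resolved cell
lemma getCell_setCell_ne (g : List (List Int)) (cd cs : Int × Int) (x y : Nat × Nat) (v : Int)
    (hd : resolveCell g cd = some x) (hs : resolveCell g cs = some y) (hne : x ≠ y) :
    getCell (setCell g cd.1 cd.2 v) cs.1 cs.2 = getCell g cs.1 cs.2 := by
  obtain ⟨a, b⟩ := x
  obtain ⟨a', b'⟩ := y
  have ha : a < g.length := pyIdx?_some_lt (resolveCell_eq_some hd).1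
  have hs' : resolveCell (setCell g cd.1 cd.2 v) cs = some (a', b') :=
    (resolveCell_congr (setCell_shapeEq g cd.1 cd.2 v) cs).trans hs
  rw [getCell_of_resolve hs', getCell_of_resolve hs, setCell_of_resolve hd]
  dsimp only
  simp only [List.getD_eq_getElem?_getD]
  by_cases haa : a' = a
  · subst haa
    have hbb : b' ≠ b := by
      intro h; exact hne (by rw [h])
    rw [List.getElem?_set_self ha]
    simp only [Option.getD_some]
    rw [List.getElem?_set_ne (by omega : b ≠ b')]
  · rw [List.getElem?_set_ne (by omega : a ≠ a')]

-- writes to two DIFFERENT resolved cells commute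
lemma setCell_comm (g : List (List Int)) (c1 c2 : Int × Int) (x y : Nat × Nat) (v1 v2 : Int)
    (h1 : resolveCell g c1 = some x) (h2 : resolveCell g c2 = some y) (hne : x ≠ y) :
    setCell (setCell g c1.1 c1.2 v1) c2.1 c2.2 v2
      = setCell (setCell g c2.1 c2.2 v2) c1.1 c1.2 v1 := by
  obtain ⟨a, b⟩ := x
  obtain ⟨a', b'⟩ := y
  have ha : a < g.length := pyIdx?_some_lt (resolveCell_eq_some h1).1
  have ha' : a' < g.length := pyIdx?_some_lt (resolveCell_eq_some h2).1
  have h1' : resolveCell (setCell g c2.1 c2.2 v2) c1 = some (a, b) :=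
    (resolveCell_congr (setCell_shapeEq g c2.1 c2.2 v2) c1).trans h1
  have h2' : resolveCell (setCell g c1.1 c1.2 v1) c2 = some (a', b') :=
    (resolveCell_congr (setCell_shapeEq g c1.1 c1.2 v1) c2).trans h2
  rw [setCell_of_resolve h2', setCell_of_resolve h1, setCell_of_resolve h1',
    setCell_of_resolve h2]
  dsimp only
  simp only [List.getD_eq_getElem?_getD]
  by_cases haa : a = a'
  · subst haa
    have hbb : b ≠ b' := by
      intro h; exact hne (by rw [h])
    simp only [List.getElem?_set_self ha, Option.getD_some, List.set_set]
    rw [List.set_comm _ _ hbb]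
  · simp only [List.getElem?_set_ne (by omega : a ≠ a'),
      List.getElem?_set_ne (by omega : a' ≠ a)]
    exact List.set_comm _ _ haa

-- reading a cell is unaffected by a write list whose destinations all resolve elsewhere
lemma getCell_wl (room : List (List Int)) (L : List ((Int × Int) × Int)) :
    ∀ g : List (List Int), shapeEq g room → ∀ (c : Int × Int) (y : Nat × Nat),
      resolveCell room c = some y →
      (∀ q ∈ L, ∃ z, resolveCell room q.1 = some z ∧ z ≠ y) →
      getCell (wl g L) c.1 c.2 = getCell g c.1 c.2 := by
  induction L with
  | nil => intro g _ c y _ _; rfl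
  | cons q rest ih =>
    intro g hsh c y hy hL
    obtain ⟨z, hz, hzne⟩ := hL q (List.mem_cons_self ..)
    have hstep : wl g (q :: rest) = wl (setCell g q.1.1 q.1.2 q.2) rest := rfl
    rw [hstep, ih (setCell g q.1.1 q.1.2 q.2)
      (shapeEq_trans (setCell_shapeEq ..) hsh) c y hy
      (fun q' h' => hL q' (List.mem_cons_of_mem _ h'))]
    exact getCell_setCell_ne g q.1 c z y q.2
      ((resolveCell_congr hsh q.1).trans hz) ((resolveCell_congr hsh c).trans hy) hzne

-- a write to a cell outside a write list's destinations moves across the list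
lemma wl_setCell_comm (room : List (List Int)) (L : List ((Int × Int) × Int)) :
    ∀ g : List (List Int), shapeEq g room → ∀ (c : Int × Int) (y : Nat × Nat) (v : Int),
      resolveCell room c = some y →
      (∀ q ∈ L, ∃ z, resolveCell room q.1 = some z ∧ z ≠ y) →
      wl (setCell g c.1 c.2 v) L = setCell (wl g L) c.1 c.2 v := by
  induction L with
  | nil => intro g _ c y v _ _; rfl
  | cons q rest ih =>
    intro g hsh c y v hy hL
    obtain ⟨z, hz, hzne⟩ := hL q (List.mem_cons_self ..)
    have swap : setCell (setCell g c.1 c.2 v) q.1.1 q.1.2 q.2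
        = setCell (setCell g q.1.1 q.1.2 q.2) c.1 c.2 v :=
      setCell_comm g c q.1 y z v q.2 ((resolveCell_congr hsh c).trans hy)
        ((resolveCell_congr hsh q.1).trans hz) (fun h => hzne h.symm)
    calc wl (setCell g c.1 c.2 v) (q :: rest)
        = wl (setCell (setCell g c.1 c.2 v) q.1.1 q.1.2 q.2) rest := rfl
      _ = wl (setCell (setCell g q.1.1 q.1.2 q.2) c.1 c.2 v) rest := by rw [swap]
      _ = setCell (wl (setCell g q.1.1 q.1.2 q.2) rest) c.1 c.2 v :=
          ih (setCell g q.1.1 q.1.2 q.2) (shapeEq_trans (setCell_shapeEq ..) hsh) c y v hy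
            (fun q' h' => hL q' (List.mem_cons_of_mem _ h'))
      _ = setCell (wl g (q :: rest)) c.1 c.2 v := rfl

-- A's carry loop over a duplicate-free path writes each cell's predecessor value (gathered once)
lemma carry_fold (room : List (List Int)) :
    ∀ (p : List (Int × Int)) (g : List (List Int)) (prev : Int), shapeEq g room →
      (∀ c ∈ p, ∃ z, resolveCell room c = some z) →
      ((p.map (resolveCell room)).Nodup) →
      p.foldl (fun st q => windStep st q.1 q.2) (g, prev)
        = (wl g (p.zip (prev :: p.map (fun c => getCell g c.1 c.2))),
           (prev :: p.map (fun c => getCell g c.1 c.2)).getLast (List.cons_ne_nil _ _)) := by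
  intro p
  induction p with
  | nil => intro g prev _ _ _; simp [wl]
  | cons c p' ih =>
    intro g prev hsh hres hnd
    obtain ⟨zc, hzc⟩ := hres c (List.mem_cons_self ..)
    simp only [List.map_cons, List.nodup_cons] at hnd
    have hne : ∀ d ∈ p', ∃ zd, resolveCell room d = some zd ∧ zd ≠ zc := by
      intro d hd
      obtain ⟨zd, hzd⟩ := hres d (List.mem_cons_of_mem _ hd)
      refine ⟨zd, hzd, fun h => ?_⟩
      exact hnd.1 (by rw [hzc, ← h, ← hzd]; exact List.mem_map_of_mem hd)
    have hmap : p'.map (fun d => getCell (setCell g c.1 c.2 prev) d.1 d.2)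
        = p'.map (fun d => getCell g d.1 d.2) := by
      refine List.map_congr_left ?_
      intro d hd
      obtain ⟨zd, hzd, hzdne⟩ := hne d hd
      exact getCell_setCell_ne g c d zc zd prev
        ((resolveCell_congr hsh c).trans hzc) ((resolveCell_congr hsh d).trans hzd) (by
          intro h; exact hzdne (by rw [← h]))
    rw [List.foldl_cons,
      show windStep (g, prev) c.1 c.2
        = (setCell g c.1 c.2 prev, getCell g c.1 c.2) from rfl,
      ih (setCell g c.1 c.2 prev) (getCell g c.1 c.2)
        (shapeEq_trans (setCell_shapeEq ..) hsh)
        (fun d hd => hres d (List.mem_cons_of_mem _ hd)) hnd.2,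
      hmap]
    refine Prod.ext rfl ?_
    simp [List.getLast_cons]

-- B's backward walk over a duplicate-free path performs the same gathered writes
lemma backfoldr (room : List (List Int)) :
    ∀ (p : List (Int × Int)) (g : List (List Int)), shapeEq g room →
      (∀ c ∈ p, ∃ z, resolveCell room c = some z) →
      ((p.map (resolveCell room)).Nodup) →
      (p.tail.zip p).foldr (fun dq h => setCell h dq.1.1 dq.1.2 (getCell h dq.2.1 dq.2.2)) g
        = wl g (p.tail.zip (p.map (fun c => getCell g c.1 c.2))) := by
  intro p
  induction p with
  | nil => intro g _ _ _; rfl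
  | cons c p' ih =>
    intro g hsh hres hnd
    cases p' with
    | nil => rfl
    | cons d t =>
      obtain ⟨zc, hzc⟩ := hres c (List.mem_cons_self ..)
      obtain ⟨zd, hzd⟩ := hres d (by simp)
      rw [List.map_cons] at hnd
      obtain ⟨hcnin, hnd2⟩ := List.nodup_cons.mp hnd
      rw [List.map_cons] at hnd2
      obtain ⟨hdnin, hnd3⟩ := List.nodup_cons.mp hnd2
      have hct : ∀ e ∈ d :: t, ∃ z, resolveCell room e = some z ∧ z ≠ zc := by
        intro e he
        obtain ⟨z, hz⟩ := hres e (List.mem_cons_of_mem _ he)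
        refine ⟨z, hz, fun h => ?_⟩
        refine hcnin ?_
        rw [hzc, ← h, ← hz, List.map_cons]
        exact List.mem_map_of_mem he
      have hdt : ∀ e ∈ t, ∃ z, resolveCell room e = some z ∧ z ≠ zd := by
        intro e he
        obtain ⟨z, hz⟩ := hres e (by simp [he])
        refine ⟨z, hz, fun h => ?_⟩
        refine hdnin ?_
        rw [hzd, ← h, ← hz]
        exact List.mem_map_of_mem he
      have hL' : ∀ q ∈ t.zip ((d :: t).map (fun e => getCell g e.1 e.2)),
          ∃ z, resolveCell room q.1 = some z ∧ z ≠ zc := by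
        intro q hq
        exact hct q.1 (List.mem_cons_of_mem _ (List.of_mem_zip hq).1)
      have hL'd : ∀ q ∈ t.zip ((d :: t).map (fun e => getCell g e.1 e.2)),
          ∃ z, resolveCell room q.1 = some z ∧ z ≠ zd := by
        intro q hq
        exact hdt q.1 (List.of_mem_zip hq).1
      have ihh := ih g hsh (fun e he => hres e (List.mem_cons_of_mem _ he)) hnd2
      simp only [List.tail_cons] at ihh ⊢
      rw [List.zip_cons_cons, List.foldr_cons, ihh]
      rw [getCell_wl room _ g hsh c zc hzc hL']
      rw [← wl_setCell_comm room _ g hsh d zd (getCell g c.1 c.2) hzd hL'd]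
      rfl

lemma backShift_eq (room : List (List Int)) (p : List (Int × Int)) (g : List (List Int))
    (hsh : shapeEq g room)
    (hres : ∀ c ∈ p, ∃ z, resolveCell room c = some z)
    (hnd : (p.map (resolveCell room)).Nodup) :
    backShift g p = wl g (p.zip (0 :: p.map (fun c => getCell g c.1 c.2))) := by
  cases p with
  | nil => rfl
  | cons c p' =>
    obtain ⟨zc, hzc⟩ := hres c (List.mem_cons_self ..)
    have hct : ∀ q ∈ p'.zip ((c :: p').map (fun e => getCell g e.1 e.2)),
        ∃ z, resolveCell room q.1 = some z ∧ z ≠ zc := by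
      intro q hq
      have hq1 : q.1 ∈ p' := (List.of_mem_zip hq).1
      obtain ⟨z, hz⟩ := hres q.1 (List.mem_cons_of_mem _ hq1)
      rw [List.map_cons] at hnd
      refine ⟨z, hz, fun h => ?_⟩
      refine (List.nodup_cons.mp hnd).1 ?_
      rw [hzc, ← h, ← hz]
      exact List.mem_map_of_mem hq1
    show setCell (((((c :: p').tail.zip (c :: p')).reverse).foldl
      (fun h dq => setCell h dq.1.1 dq.1.2 (getCell h dq.2.1 dq.2.2)) g)) c.1 c.2 0 = _
    rw [List.foldl_reverse]
    have hb := backfoldr room (c :: p') g hsh hres hnd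
    simp only [List.tail_cons] at hb ⊢
    rw [hb]
    rw [← wl_setCell_comm room _ g hsh c zc 0 hzc hct]
    rfl

-- grid part of the carry fold (what A's code projects out)
lemma carry_fold_fst (room : List (List Int)) (p : List (Int × Int)) (g : List (List Int))
    (prev : Int) (hsh : shapeEq g room)
    (hres : ∀ c ∈ p, ∃ z, resolveCell room c = some z)
    (hnd : (p.map (resolveCell room)).Nodup) :
    (p.foldl (fun st q => windStep st q.1 q.2) (g, prev)).1
      = wl g (p.zip (prev :: p.map (fun c => getCell g c.1 c.2))) := by
  rw [carry_fold room p g prev hsh hres hnd]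

-- A's row/column loops are folds over the corresponding coordinate lists
lemma foldl_windStep_row (l : List Int) (r : Int) (st : List (List Int) × Int) :
    l.foldl (fun s j => windStep s r j) st
      = (l.map (fun j => (r, j))).foldl (fun s (q : Int × Int) => windStep s q.1 q.2) st := by
  rw [List.foldl_map]

lemma foldl_windStep_col (l : List Int) (jc : Int) (st : List (List Int) × Int) :
    l.foldl (fun s i => windStep s i jc) st
      = (l.map (fun i => (i, jc))).foldl (fun s (q : Int × Int) => windStep s q.1 q.2) st := by
  rw [List.foldl_map]

lemma pathTop_eq (cond1 : List Int) (C : Int) :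
    pathTop cond1 C
      = ((((PySem.List.pyRange (PySem.List.pyGetD cond1 1 0 + 1) C 1).map
            (fun j => (PySem.List.pyGetD cond1 0 0, j)))
        ++ ((PySem.List.pyRange (PySem.List.pyGetD cond1 0 0 - 1) (-1) (-1)).map
            (fun i => (i, C - 1))))
        ++ ((PySem.List.pyRange (C - 2) (-1) (-1)).map (fun j => ((0 : Int), j))))
        ++ ((PySem.List.pyRange 1 (PySem.List.pyGetD cond1 0 0) 1).map
            (fun i => (i, (0 : Int)))) := rfl

lemma pathBottom_eq (cond2 : List Int) (R : Int) (C : Int) :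
    pathBottom cond2 R C
      = ((((PySem.List.pyRange (PySem.List.pyGetD cond2 1 0 + 1) C 1).map
            (fun j => (PySem.List.pyGetD cond2 0 0, j)))
        ++ ((PySem.List.pyRange (PySem.List.pyGetD cond2 0 0 + 1) R 1).map
            (fun i => (i, C - 1))))
        ++ ((PySem.List.pyRange (C - 2) (-1) (-1)).map (fun j => (R - 1, j))))
        ++ ((PySem.List.pyRange (R - 2) (PySem.List.pyGetD cond2 0 0) (-1)).map
            (fun i => (i, (0 : Int)))) := rfl

-- ===== VERDICT (by name: the statement is the Claim_ definition above) =====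
theorem wind_spec : Claim_equal_wind := by
  intro room cond1 cond2 R C hdom hpre
  unfold Spec_wind
  obtain ⟨hl1, hl2, hp1, hp2, hrT, hndT, hrB, hndB⟩ := hpre
  have hresT : ∀ c ∈ pathTop cond1 C, ∃ z, resolveCell room c = some z := by
    intro c hc; exact Option.isSome_iff_exists.mp (hrT c hc)
  have hresB : ∀ c ∈ pathBottom cond2 R C, ∃ z, resolveCell room c = some z := by
    intro c hc; exact Option.isSome_iff_exists.mp (hrB c hc)
  simp only [wind, wind_alt]
  rw [backShift_eq room (pathTop cond1 C) room (shapeEq_refl room) hresT hndT]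
  rw [backShift_eq room (pathBottom cond2 R C)
    (wl room ((pathTop cond1 C).zip
      (0 :: (pathTop cond1 C).map (fun c => getCell room c.1 c.2))))
    (wl_shapeEq _ room) hresB hndB]
  simp only [foldl_windStep_row, foldl_windStep_col]
  simp only [← List.foldl_append]
  rw [← pathTop_eq cond1 C, ← pathBottom_eq cond2 R C]
  rw [carry_fold_fst room (pathTop cond1 C) room 0 (shapeEq_refl room) hresT hndT]
  rw [carry_fold_fst room (pathBottom cond2 R C)
    (wl room ((pathTop cond1 C).zip
      (0 :: (pathTop cond1 C).map (fun c => getCell room c.1 c.2))))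
    0 (wl_shapeEq _ room) hresB hndB]
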